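-- pv_equiv track=rewrite | github.com/Paul-scpark/Coding-test | programmers/1_귤고르기.py | solution
-- ===== SOURCE A (Python) =====
-- from collections import Counter
--
-- def solution(k, tangerine):
--
--     # tangerine에서 반복되었던 숫자만큼 dict를 만들고, value 값을 기준으로 내림차순으로 정렬
--     t_dic = dict(Counter(tangerine))
--     t_dic_sorted = dict(sorted(t_dic.items(), key=lambda item: item[1], reverse=True))
--
--     # 같은 크기의 귤이 많은 것들부터 채워나가면서 box를 한 개씩 증가시키기
--     # 단, 귤이 k개 이상 찼다면 반복을 중단해주기
--     box, k_sum = 0, 0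
--     for i in t_dic_sorted.keys():
--         k_sum += t_dic_sorted[i]
--         box += 1
--
--         if k_sum >= k: break
--
--     return box
-- ===== SOURCE B (Python) =====
-- def solution(k, tangerine):
--     # frequency-of-frequencies histogram scanned from the highest count down,
--     # instead of sorting the counted items
--     counts = {}
--     for t in tangerine:
--         counts[t] = counts.get(t, 0) + 1
--     vals = counts.values()
--     hist = {}
--     m = 0
--     for c in vals:
--         hist[c] = hist.get(c, 0) + 1
--         if c > m:
--             m = c
--     box = 0
--     k_sum = 0
--     for freq in range(m, 0, -1):
--         for _ in range(hist.get(freq, 0)):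
--             k_sum += freq
--             box += 1
--             if k_sum >= k:
--                 return box
--     return box
-- ===== Notes on version B (the rewrite author's own statement) =====
-- stated objective: alternative
-- what changed: Replaces Counter + sort-by-count-descending + dict rebuild with a frequency-of-frequencies histogram scanned from the maximal count down to 1, so no sort is performed.
import Mathlib
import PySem

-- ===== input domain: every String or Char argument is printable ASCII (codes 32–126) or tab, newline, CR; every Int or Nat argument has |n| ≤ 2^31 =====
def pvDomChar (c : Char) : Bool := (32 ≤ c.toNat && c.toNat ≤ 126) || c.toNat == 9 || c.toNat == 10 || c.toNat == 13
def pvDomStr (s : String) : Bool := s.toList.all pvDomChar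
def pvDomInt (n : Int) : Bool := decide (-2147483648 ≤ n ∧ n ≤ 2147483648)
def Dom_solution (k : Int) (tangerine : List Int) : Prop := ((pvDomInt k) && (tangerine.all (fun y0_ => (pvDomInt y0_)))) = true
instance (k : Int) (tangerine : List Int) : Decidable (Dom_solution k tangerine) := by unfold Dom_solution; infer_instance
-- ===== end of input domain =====

-- B replaces A's sort of the counted items by a frequency-of-frequencies histogram
-- scanned from the maximal count downwards (alternative decomposition, no sort).

-- ===== PORT A =====
-- the 'for i in t_dic_sorted.keys(): … break' loop; t_dic_sorted[i] is d.getD i 0,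
-- exact because every i iterated is a key of d
def solutionLoop (d : PySem.Dict Int Int) (k : Int) : List Int → Int → Int → Int
  | [], box, _ => box
  | i :: rest, box, ksum =>
      let ksum := ksum + d.getD i 0
      let box := box + 1
      if ksum ≥ k then box else solutionLoop d k rest box ksum

def solution (k : Int) (tangerine : List Int) : Int :=
  let t_dic := PySem.Dict.counter tangerine
  let t_dic_sorted := PySem.Dict.ofList (PySem.List.sorted t_dic.items (fun it => it.2) true)
  solutionLoop t_dic_sorted k t_dic_sorted.keys 0 0

-- ===== PORT B =====
-- inner 'for _ in range(hist.get(freq, 0)): …' with early return signalled by the Bool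
def altInner (k freq : Int) : Nat → Int → Int → Bool × Int × Int
  | 0, box, ksum => (false, box, ksum)
  | n + 1, box, ksum =>
      let ksum := ksum + freq
      let box := box + 1
      if ksum ≥ k then (true, box, ksum) else altInner k freq n box ksum

-- outer 'for freq in range(m, 0, -1)'
def altOuter (k : Int) (hist : PySem.Dict Int Int) : List Int → Int → Int → Int
  | [], box, _ => box
  | freq :: rest, box, ksum =>
      match altInner k freq (hist.getD freq 0).toNat box ksum with
      | (true, box, _) => box
      | (false, box, ksum) => altOuter k hist rest box ksum

def solution_alt (k : Int) (tangerine : List Int) : Int :=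
  let counts := tangerine.foldl (fun d t => d.insert t (d.getD t 0 + 1)) PySem.Dict.empty
  let vals := counts.values
  let hm := vals.foldl
      (fun (p : PySem.Dict Int Int × Int) c =>
        (p.1.insert c (p.1.getD c 0 + 1), if c > p.2 then c else p.2))
      (PySem.Dict.empty, 0)
  altOuter k hm.1 (PySem.List.pyRange hm.2 0 (-1)) 0 0

-- ===== PRECONDITION & SPEC =====
def Spec_solution (k : Int) (tangerine : List Int) (out : Int) : Prop := out = solution_alt k tangerine
instance (k : Int) (tangerine : List Int) (out : Int) : Decidable (Spec_solution k tangerine out) := by unfold Spec_solution; infer_instance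

-- ===== CLAIM (what is proved, stated in full; the proofs are below) =====
def Claim_equal_solution : Prop := ∀ (k : Int) (tangerine : List Int), Dom_solution k tangerine → Spec_solution k tangerine (solution k tangerine)

-- ===== LEMMAS AND PROOFS =====

-- abstract greedy loop over the list of counts, used by both directions of the proof
def greedy (k : Int) : List Int → Int → Int → Int
  | [], box, _ => box
  | c :: rest, box, ksum =>
      let ksum := ksum + c
      let box := box + 1
      if ksum ≥ k then box else greedy k rest box ksum

theorem solutionLoop_eq_greedy (d : PySem.Dict Int Int) (k : Int) (ks : List Int)
    (box ksum : Int) :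
    solutionLoop d k ks box ksum = greedy k (ks.map (fun i => d.getD i 0)) box ksum := by
  induction ks generalizing box ksum with
  | nil => rfl
  | cons i rest ih => simp [solutionLoop, greedy, ih]

theorem greedy_replicate_append (k f : Int) (n : Nat) (rest : List Int) (box ksum : Int) :
    greedy k (List.replicate n f ++ rest) box ksum =
      match altInner k f n box ksum with
      | (true, b, _) => b
      | (false, b, s) => greedy k rest b s := by
  induction n generalizing box ksum with
  | zero => rfl
  | succ n ih =>
      simp only [List.replicate_succ, List.cons_append, greedy, altInner]
      split_ifs with h
      · rfl
      · exact ih _ _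

theorem altOuter_eq_greedy (k : Int) (hist : PySem.Dict Int Int) (fs : List Int)
    (box ksum : Int) :
    altOuter k hist fs box ksum =
      greedy k (fs.flatMap (fun f => List.replicate (hist.getD f 0).toNat f)) box ksum := by
  induction fs generalizing box ksum with
  | nil => rfl
  | cons f rest ih =>
      simp only [altOuter, List.flatMap_cons, greedy_replicate_append]
      rcases h : altInner k f (hist.getD f 0).toNat box ksum with ⟨b, box', ksum'⟩
      cases b <;> simp [ih]

-- count of v in a flatMap of replicate-blocks over a duplicate-free level list
theorem count_flatMap_replicate (R : List Int) (n : Int → Nat) (v : Int) (hnd : R.Nodup) :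
    (R.flatMap (fun f => List.replicate (n f) f)).count v = if v ∈ R then n v else 0 := by
  induction R with
  | nil => simp
  | cons f rest ih =>
      simp only [List.flatMap_cons, List.count_append, List.count_replicate,
        List.nodup_cons] at *
      rcases hnd with ⟨hf, hrest⟩
      by_cases hv : v = f
      · subst hv
        simp [ih hrest, hf]
      · simp [hv, ih hrest, List.mem_cons, Ne.symm hv]

theorem mem_flatMap_replicate {R : List Int} {n : Int → Nat} {x : Int}
    (h : x ∈ R.flatMap (fun f => List.replicate (n f) f)) : x ∈ R := by
  rcases List.mem_flatMap.mp h with ⟨f, hf, hx⟩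
  rcases List.eq_of_mem_replicate hx with rfl
  exact hf

theorem pairwise_flatMap_replicate (R : List Int) (n : Int → Nat)
    (h : R.Pairwise (fun a b => b < a)) :
    (R.flatMap (fun f => List.replicate (n f) f)).Pairwise (fun a b : Int => b ≤ a) := by
  induction R with
  | nil => simp
  | cons f rest ih =>
      rcases List.pairwise_cons.mp h with ⟨hf, hrest⟩
      simp only [List.flatMap_cons]
      rw [List.pairwise_append]
      refine ⟨List.pairwise_replicate.mpr (by simp), ih hrest, ?_⟩
      intro a ha b hb
      rcases List.eq_of_mem_replicate ha with rfl
      exact le_of_lt (hf b (mem_flatMap_replicate hb))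

theorem solution_spec_aux (k : Int) (xs : List Int) :
    solution k xs = solution_alt k xs := by
  have hperm : (PySem.List.sorted (PySem.Dict.counter xs).items (fun it => it.2) true).Perm
      (PySem.Dict.counter xs).items := PySem.List.sorted_perm _ _ _
  set items := (PySem.Dict.counter xs).items with hitems
  set sortedItems := PySem.List.sorted items (fun it => it.2) true with hsi
  have hndk : (sortedItems.map Prod.fst).Nodup := by
    have h2 : (items.map Prod.fst).Nodup := PySem.Dict.nodup_keys_counter xs
    exact ((hperm.map Prod.fst).nodup_iff).mpr h2
  have hofl : PySem.Dict.ofList sortedItems = PySem.Dict.mk sortedItems := by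
    apply PySem.Dict.ext
    have h3 := PySem.Dict.items_foldl_insert_fresh sortedItems Prod.fst Prod.snd PySem.Dict.empty
      (fun a _ => PySem.Dict.contains_empty a.1) hndk
    simpa [PySem.Dict.ofList, PySem.Dict.update, PySem.Dict.empty] using h3
  set vals := (PySem.Dict.counter xs).values with hvals
  have hA : solution k xs = greedy k (sortedItems.map (fun it => it.2)) 0 0 := by
    simp only [solution, ← hitems, ← hsi, hofl, solutionLoop_eq_greedy]
    congr 1
    have hnd : (PySem.Dict.mk sortedItems).keys.Nodup := hndk
    rw [← PySem.Dict.values_eq_map_keys _ hnd 0]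
    exact PySem.Dict.values_mk sortedItems
  -- B side
  set m := vals.foldl (fun m c => if c > m then c else m) 0 with hm
  have hmmax : m = vals.foldl max 0 := by
    rw [hm]
    apply PySem.List.foldl_congr_mem
    intro acc x _
    by_cases h : x ≤ acc <;> simp [max_def, h]; omega
  have hub : ∀ v ∈ vals, v ≤ m := by rw [hmmax]; exact (PySem.List.le_foldl_max vals 0).2
  have hm0 : (0 : Int) ≤ m := by rw [hmmax]; exact (PySem.List.le_foldl_max vals 0).1
  have hpos : ∀ v ∈ vals, 1 ≤ v := by
    intro v hv
    rw [hvals] at hv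
    simp only [PySem.Dict.values, PySem.Dict.items_counter, List.map_map, List.mem_map] at hv
    rcases hv with ⟨y, hy, rfl⟩
    have : y ∈ xs := (PySem.Set.mem_ofList xs y).mp hy
    have : 0 < xs.count y := List.count_pos_iff.mpr this
    simp only [Function.comp]
    omega
  have hhist : ∀ f : Int,
      (vals.foldl (fun d c => d.insert c (d.getD c 0 + 1)) PySem.Dict.empty).getD f 0
        = (vals.count f : Int) := by
    intro f
    rw [PySem.Dict.getD_foldl_insert_add_one]
    simp
  set R := (List.range m.toNat).map (fun j : Nat => m - ((j : Nat) : Int)) with hR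
  have hrange : PySem.List.pyRange m 0 (-1) = R := by
    simp only [PySem.List.pyRange]
    norm_num
    have hc : (if 0 < m then m.toNat else 0) = m.toNat := by split_ifs <;> omega
    rw [hc, hR]
    apply List.map_congr_left
    intro j _
    omega
  have hRnd : R.Nodup := by
    rw [hR]
    exact List.Nodup.map (fun a b h => by omega) List.nodup_range
  have hmemR : ∀ v : Int, v ∈ R ↔ 1 ≤ v ∧ v ≤ m := by
    intro v
    rw [hR]
    simp only [List.mem_map, List.mem_range]
    constructor
    · rintro ⟨j, hj, rfl⟩; omega
    · rintro ⟨h1, h2⟩; exact ⟨(m - v).toNat, by omega, by omega⟩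
  have hpermB : (R.flatMap (fun f => List.replicate (vals.count f) f)).Perm vals := by
    rw [List.perm_iff_count]
    intro v
    rw [count_flatMap_replicate R _ v hRnd]
    by_cases hv : v ∈ R
    · simp [hv]
    · have : v ∉ vals := fun hmem => hv ((hmemR v).mpr ⟨hpos v hmem, hub v hmem⟩)
      simp [hv, List.count_eq_zero.mpr this]
  have hsortB : (R.flatMap (fun f => List.replicate (vals.count f) f)).Pairwise
      (fun a b : Int => b ≤ a) := by
    apply pairwise_flatMap_replicate
    rw [hR]
    exact List.pairwise_lt_range.map _ (fun a b h => by omega)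
  have hsortA : (sortedItems.map (fun it => it.2)).Pairwise (fun a b : Int => b ≤ a) :=
    (PySem.List.sorted_pairwise_rev items (fun it => it.2)).map _ (fun a b h => h)
  have hpermA : (sortedItems.map (fun it => it.2)).Perm vals := by
    have h4 := hperm.map (fun it : Int × Int => it.2)
    rw [hvals]
    exact h4
  have hAB : sortedItems.map (fun it => it.2)
      = R.flatMap (fun f => List.replicate (vals.count f) f) :=
    List.Perm.eq_of_pairwise (fun a b _ _ h1 h2 => le_antisymm h2 h1) hsortA hsortB
      (hpermA.trans hpermB.symm)
  rw [hA, hAB]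
  simp only [solution_alt]
  rw [PySem.Dict.foldl_insert_getD_add_one_eq_counter, ← hvals]
  have hsplit := PySem.List.foldl_prod_mk
    (f := fun (d : PySem.Dict Int Int) (c : Int) => d.insert c (d.getD c 0 + 1))
    (g := fun (m c : Int) => if c > m then c else m) vals PySem.Dict.empty 0
  rw [hsplit, ← hm, hrange, altOuter_eq_greedy]
  congr 1
  apply List.flatMap_congr
  intro f _
  rw [hhist f]
  simp

-- ===== VERDICT (by name: the statement is the Claim_ definition above) =====
theorem solution_spec : Claim_equal_solution := by
  intro k tangerine _
  exact solution_spec_aux k tangerine
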